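-- pv_equiv track=rewrite | github.com/matteobucalossi50/FIRe-Fake-Italian-Restaurants-evaluator | analysis/Indexes.py | term_doc_grams
-- ===== SOURCE A (Python) =====
-- def term_doc_grams(all_tokens, corpus, all_ngrams):  # n^3 v slow
--     dic = {}
--     for tok in all_tokens:
--         doc_dic = {}
--         for key, value in corpus.items():
--             grams = []
--             for gram in all_ngrams:
--                 if tok in gram:
--                     grams.append(gram)
--             doc_dic[key] = grams
--         dic[tok] = doc_dic
--     return dic
-- ===== SOURCE B (Python) =====
-- def term_doc_grams(all_tokens, corpus, all_ngrams):
--     keys = list(corpus)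
--     return {
--         tok: dict.fromkeys(keys, [g for g in all_ngrams if tok in g])
--         for tok in dict.fromkeys(all_tokens)
--     }
-- ===== Notes on version B (the rewrite author's own statement) =====
-- stated objective: faster
-- what changed: B hoists the per-token ngram scan out of the document loop (computing each token's gram list once) and builds the result with dict comprehensions over the deduplicated token and key lists, instead of A's three nested loops that rescan all ngrams for every (token, document) pair.
import Mathlib
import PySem

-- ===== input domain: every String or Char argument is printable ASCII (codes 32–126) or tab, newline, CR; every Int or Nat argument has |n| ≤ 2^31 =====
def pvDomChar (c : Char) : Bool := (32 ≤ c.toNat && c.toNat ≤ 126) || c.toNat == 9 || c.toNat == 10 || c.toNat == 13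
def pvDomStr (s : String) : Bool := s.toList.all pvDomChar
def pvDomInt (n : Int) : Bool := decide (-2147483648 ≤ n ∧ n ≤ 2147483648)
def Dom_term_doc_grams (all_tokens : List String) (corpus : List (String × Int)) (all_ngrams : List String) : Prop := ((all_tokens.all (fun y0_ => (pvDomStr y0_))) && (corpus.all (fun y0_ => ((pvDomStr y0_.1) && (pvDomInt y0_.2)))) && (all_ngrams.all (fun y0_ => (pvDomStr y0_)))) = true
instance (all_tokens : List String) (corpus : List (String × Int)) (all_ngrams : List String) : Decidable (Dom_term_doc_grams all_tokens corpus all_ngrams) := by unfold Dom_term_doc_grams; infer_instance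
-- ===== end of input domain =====

-- B computes each token's gram list once (instead of once per document) and builds the per-document
-- dict from the deduplicated key list; objective: faster (drops the ngram scan out of the doc loop).

-- ===== PORT A =====
-- literal transliteration of A: three nested loops, dicts built by repeated insertion
def term_doc_grams (all_tokens : List String) (corpus : List (String × Int)) (all_ngrams : List String) : List (String × List (String × List String)) :=
  (all_tokens.foldl (fun dic tok =>
      let doc_dic := corpus.foldl (fun dd kv =>
          let grams := all_ngrams.foldl (fun gs gram =>
              if PySem.Str.isIn tok gram then gs ++ [gram] else gs) ([] : List String)
          dd.insert kv.1 grams)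
        (PySem.Dict.empty : PySem.Dict String (List String))
      dic.insert tok doc_dic.items)
    (PySem.Dict.empty : PySem.Dict String (List (String × List String)))).items

-- ===== PORT B =====
-- transliteration of Source B: keys = list(corpus); one dict comprehension over dict.fromkeys(all_tokens),
-- grams computed once per distinct token, dict.fromkeys(keys, grams) as the per-doc dict
def term_doc_grams_alt (all_tokens : List String) (corpus : List (String × Int)) (all_ngrams : List String) : List (String × List (String × List String)) :=
  let keys := PySem.List.dedup (corpus.map Prod.fst)
  (PySem.List.dedup all_tokens).map (fun tok =>
    let grams := all_ngrams.filter (fun g => PySem.Str.isIn tok g)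
    (tok, keys.map (fun k => (k, grams))))

-- ===== PRECONDITION & SPEC =====
def Spec_term_doc_grams (all_tokens : List String) (corpus : List (String × Int)) (all_ngrams : List String) (out : List (String × List (String × List String))) : Prop := out = term_doc_grams_alt all_tokens corpus all_ngrams
instance (all_tokens : List String) (corpus : List (String × Int)) (all_ngrams : List String) (out : List (String × List (String × List String))) : Decidable (Spec_term_doc_grams all_tokens corpus all_ngrams out) := by unfold Spec_term_doc_grams; infer_instance

-- ===== CLAIM (what is proved, stated in full; the proofs are below) =====
def Claim_equal_term_doc_grams : Prop := ∀ (all_tokens : List String) (corpus : List (String × Int)) (all_ngrams : List String), Dom_term_doc_grams all_tokens corpus all_ngrams → Spec_term_doc_grams all_tokens corpus all_ngrams (term_doc_grams all_tokens corpus all_ngrams)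

-- ===== LEMMAS AND PROOFS =====

-- looking up in a fold of inserts whose value is a function of the key alone
lemma getD_foldl_insert_key_fun {β γ : Type} (l : List β) (key : β → String) (f : String → γ)
    (d : PySem.Dict String γ) (k : String) (dflt : γ) :
    (l.foldl (fun d x => d.insert (key x) (f (key x))) d).getD k dflt
      = if k ∈ l.map key then f k else d.getD k dflt := by
  induction l generalizing d with
  | nil => simp
  | cons x l ih =>
    simp only [List.foldl_cons, List.map_cons, List.mem_cons, ih]
    by_cases h : k ∈ l.map key
    · simp [h]
    · by_cases h2 : k = key x <;> simp [PySem.Dict.getD_insert, h, h2]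

-- items of a fold of inserts (value a function of the key): dedup'd keys paired with their values
lemma items_foldl_insert_fun {γ : Type} (l : List String) (f : String → γ) :
    (l.foldl (fun d t => d.insert t (f t)) (PySem.Dict.empty : PySem.Dict String γ)).items
      = (PySem.List.dedup l).map (fun t => (t, f t)) := by
  have hnd := PySem.Dict.nodup_keys_foldl_insert_key l (fun t => t) (fun _ t => f t)
      (PySem.Dict.empty : PySem.Dict String γ) (by simp)
  rw [PySem.Dict.items_eq_map_keys _ hnd (f (default))]
  rw [PySem.Dict.keys_foldl_insert_key l (fun t => t) (fun _ t => f t)]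
  simp only [PySem.Dict.keys_empty, PySem.Set.update_nil_left, List.map_id',
    ← PySem.List.dedup_eq_ofList]
  refine List.map_congr_left (fun k hk => ?_)
  rw [getD_foldl_insert_key_fun l (fun t => t) f]
  simp only [List.map_id']
  rw [if_pos (by
    rw [PySem.List.dedup_eq_ofList] at hk
    simpa using (PySem.Set.mem_ofList _ _).mp hk)]

-- items of a fold over (key, value) pairs inserting one constant value
lemma items_foldl_insert_const {γ : Type} (corpus : List (String × Int)) (v : γ) :
    (corpus.foldl (fun dd kv => dd.insert kv.1 v) (PySem.Dict.empty : PySem.Dict String γ)).items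
      = (PySem.List.dedup (corpus.map Prod.fst)).map (fun k => (k, v)) := by
  have hnd := PySem.Dict.nodup_keys_foldl_insert_key corpus Prod.fst (fun _ _ => v)
      (PySem.Dict.empty : PySem.Dict String γ) (by simp)
  rw [PySem.Dict.items_eq_map_keys _ hnd v]
  rw [PySem.Dict.keys_foldl_insert_key corpus Prod.fst (fun _ _ => v)]
  simp only [PySem.Dict.keys_empty, PySem.Set.update_nil_left, ← PySem.List.dedup_eq_ofList]
  refine List.map_congr_left (fun k hk => ?_)
  rw [getD_foldl_insert_key_fun corpus Prod.fst (fun _ => v)]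
  rw [if_pos (by
    rw [PySem.List.dedup_eq_ofList] at hk
    exact (PySem.Set.mem_ofList _ _).mp hk)]

-- ===== VERDICT (by name: the statement is the Claim_ definition above) =====
theorem term_doc_grams_spec : Claim_equal_term_doc_grams := by
  intro all_tokens corpus all_ngrams _
  show term_doc_grams all_tokens corpus all_ngrams = term_doc_grams_alt all_tokens corpus all_ngrams
  unfold term_doc_grams term_doc_grams_alt
  refine (items_foldl_insert_fun all_tokens (fun tok =>
      (corpus.foldl (fun dd kv =>
          dd.insert kv.1 (all_ngrams.foldl (fun gs gram =>
              if PySem.Str.isIn tok gram then gs ++ [gram] else gs) ([] : List String)))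
        (PySem.Dict.empty : PySem.Dict String (List String))).items)).trans ?_
  refine List.map_congr_left (fun tok _ => ?_)
  refine congrArg (Prod.mk tok) ((items_foldl_insert_const corpus _).trans ?_)
  refine List.map_congr_left (fun k _ => congrArg (Prod.mk k) ?_)
  have h := PySem.List.foldl_append_if (fun g => PySem.Str.isIn tok g) (id : String → String)
      all_ngrams []
  simp only [id_eq, List.map_id, List.nil_append] at h
  exact h
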